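-- pv_equiv track=rewrite | github.com/miliar/Code_Jam_Webscraper | solutions_python/Problem_179/2648.py | base_b_number
-- ===== SOURCE A (Python) =====
-- def base_b_number(x, b):
--     res = 0
--     mul = 1
--     while (x != 0):
--         if(x & 1):
--             res += mul
--         x >>= 1
--         mul *= b
--     return res
-- ===== SOURCE B (Python) =====
-- def base_b_number(x, b):
--     if x == 0:
--         return 0
--     return base_b_number(x >> 1, b) * b + (x & 1)
-- ===== Notes on version B (the rewrite author's own statement) =====
-- stated objective: simpler
-- what changed: Replaced the iterative loop that tracks a separate power accumulator `mul` with a direct Horner-style recursion on the bits (res(x) = res(x>>1)*b + (x&1)), removing both mutable accumulators.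
import Mathlib
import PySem

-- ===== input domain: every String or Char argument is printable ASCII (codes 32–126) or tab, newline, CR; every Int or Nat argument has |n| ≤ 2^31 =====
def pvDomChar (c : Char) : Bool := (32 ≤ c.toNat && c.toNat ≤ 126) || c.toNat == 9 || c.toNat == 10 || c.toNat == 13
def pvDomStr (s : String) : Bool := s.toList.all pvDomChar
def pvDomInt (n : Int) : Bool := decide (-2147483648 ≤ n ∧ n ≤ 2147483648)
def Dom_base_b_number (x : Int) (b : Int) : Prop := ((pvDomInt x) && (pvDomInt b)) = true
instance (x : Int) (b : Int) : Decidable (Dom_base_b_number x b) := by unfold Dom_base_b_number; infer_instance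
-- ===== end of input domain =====

-- B replaces A's loop with two accumulators (res, power mul) by a direct Horner-style
-- recursion on the bits; objective: simpler (same asymptotic cost).


-- ===== PORT A =====
-- while (x != 0): if x & 1: res += mul; x >>= 1; mul *= b
-- Loop condition ported as `0 < x`: for x = 0 it returns res exactly as Python;
-- for x < 0 the Python loop never terminates (excluded by Pre_), the port returns res.
def baseLoopA (b : Int) (x : Int) (res : Int) (mul : Int) : Int :=
  if 0 < x then
    baseLoopA b (x >>> (1:Nat)) (if PySem.Int.band x 1 ≠ 0 then res + mul else res) (mul * b)
  else res
termination_by x.toNat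
decreasing_by simp [Int.shiftRight_eq_div_pow]; omega

def base_b_number (x : Int) (b : Int) : Int := baseLoopA b x 0 1

-- ===== PORT B =====
-- if x == 0: return 0; return base_b_number(x >> 1, b) * b + (x & 1)
-- For x < 0 the Python recursion never terminates (RecursionError; excluded by Pre_),
-- the port returns 0 there.
def base_b_number_alt (x : Int) (b : Int) : Int :=
  if 0 < x then
    base_b_number_alt (x >>> (1:Nat)) b * b + PySem.Int.band x 1
  else 0
termination_by x.toNat
decreasing_by simp [Int.shiftRight_eq_div_pow]; omega

-- ===== PRECONDITION & SPEC =====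
-- Pre_ excludes x < 0, on which A's while loop never terminates (x >>= 1 stalls at -1),
-- so A returns no value there (B raises RecursionError).
def Pre_base_b_number (x : Int) (b : Int) : Prop := 0 ≤ x
instance (x : Int) (b : Int) : Decidable (Pre_base_b_number x b) := by unfold Pre_base_b_number; infer_instance
def pvWitness_base_b_number : Int × Int := (5, 3)

def Spec_base_b_number (x : Int) (b : Int) (out : Int) : Prop := out = base_b_number_alt x b
instance (x : Int) (b : Int) (out : Int) : Decidable (Spec_base_b_number x b out) := by unfold Spec_base_b_number; infer_instance

-- ===== CLAIM (what is proved, stated in full; the proofs are below) =====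
def Claim_equal_base_b_number : Prop := ∀ (x : Int) (b : Int), Dom_base_b_number x b → Pre_base_b_number x b → Spec_base_b_number x b (base_b_number x b)

-- ===== LEMMAS AND PROOFS =====

theorem shiftRight_one_natCast (n : Nat) : ((n:Int) >>> (1:Nat)) = ((n / 2 : Nat) : Int) := by
  simp [Int.shiftRight_eq_div_pow]

theorem band_one_natCast (n : Nat) : PySem.Int.band (n:Int) 1 = ((n % 2 : Nat) : Int) := by
  rw [PySem.Int.band_one]
  exact_mod_cast PySem.Int.mod_natCast n 2

-- A's loop state relates to B's Horner recursion: res + mul * (value of the remaining bits).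
theorem baseLoopA_eq_alt (b : Int) : ∀ n : Nat, ∀ res mul : Int,
    baseLoopA b (n : Int) res mul = res + mul * base_b_number_alt (n : Int) b := by
  intro n
  induction n using Nat.strong_induction_on with
  | _ n ih =>
    intro res mul
    by_cases hn : 0 < n
    · have hx : (0:Int) < (n:Int) := by exact_mod_cast hn
      rw [baseLoopA, base_b_number_alt, if_pos hx, if_pos hx,
          shiftRight_one_natCast, band_one_natCast,
          ih (n / 2) (Nat.div_lt_self hn (by omega))]
      rcases Nat.mod_two_eq_zero_or_one n with h | h <;> simp [h] <;> ring
    · have hn0 : n = 0 := by omega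
      subst hn0
      rw [baseLoopA, base_b_number_alt]
      norm_num

-- ===== VERDICT (by name: the statement is the Claim_ definition above) =====
theorem base_b_number_spec : Claim_equal_base_b_number := by
  intro x b _ hpre
  unfold Spec_base_b_number base_b_number
  obtain ⟨n, rfl⟩ : ∃ n : Nat, x = (n : Int) := ⟨x.toNat, (Int.toNat_of_nonneg hpre).symm⟩
  rw [baseLoopA_eq_alt]
  ring
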